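-- pv_equiv track=rewrite | github.com/e-vergo/TDCSG | scripts/string_search_analyzer.py | generate_namespace_variants
-- ===== SOURCE A (Python) =====
-- from typing import Dict, List, Tuple, Set
--
-- def generate_namespace_variants(full_name: str) -> List[str]:
--     """
--     Generate all namespace variants for a declaration.
--
--     Example:
--         Input: "TDCSG.CompoundSymmetry.GG5.E_re"
--         Output: ["E_re", "GG5.E_re", "CompoundSymmetry.GG5.E_re",
--                  "TDCSG.CompoundSymmetry.GG5.E_re"]
--     """
--     components = full_name.split('.')
--     variants = []
--
--     # Short name (no namespace)
--     variants.append(components[-1])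
--
--     # Progressive prefixes
--     for i in range(len(components) - 2, -1, -1):
--         variant = '.'.join(components[i:])
--         variants.append(variant)
--
--     return variants
-- ===== SOURCE B (Python) =====
-- def generate_namespace_variants(full_name: str):
--     """Generate all namespace variants by growing one accumulator string."""
--     components = full_name.split('.')
--     current = components[-1]
--     variants = [current]
--     for comp in reversed(components[:-1]):
--         current = comp + '.' + current
--         variants.append(current)
--     return variants
-- ===== Notes on version B (the rewrite author's own statement) =====
-- stated objective: alternative
-- what changed: B replaces A's per-iteration re-slicing and re-joining of the suffix components[i:] with a single accumulator string that each step is extended by one more dotted component while iterating over the remaining components in reverse.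
import Mathlib
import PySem

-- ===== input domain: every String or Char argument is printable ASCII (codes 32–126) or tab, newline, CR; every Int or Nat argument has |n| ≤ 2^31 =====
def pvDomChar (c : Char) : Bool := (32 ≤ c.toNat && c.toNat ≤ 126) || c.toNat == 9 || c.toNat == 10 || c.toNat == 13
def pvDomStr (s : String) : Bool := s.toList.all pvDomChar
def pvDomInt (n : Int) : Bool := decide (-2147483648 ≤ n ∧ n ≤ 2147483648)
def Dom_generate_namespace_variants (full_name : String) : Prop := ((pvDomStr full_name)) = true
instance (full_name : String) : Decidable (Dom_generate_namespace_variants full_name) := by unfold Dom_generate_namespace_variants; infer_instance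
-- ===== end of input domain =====

-- B builds each variant by growing one accumulator string instead of re-slicing and
-- re-joining components[i:] on every iteration (objective: alternative decomposition).

-- ===== PORT A =====
def generate_namespace_variants (full_name : String) : List String :=
  let components := (PySem.Str.split? full_name ".").getD []
  let variants : List String := [PySem.List.pyGetD components (-1) ""]
  (PySem.List.pyRange ((components.length : Int) - 2) (-1) (-1)).foldl
    (fun acc i => acc ++ [PySem.Str.join "." (PySem.List.slice components (some i) none)])
    variants

-- ===== PORT B =====
def generate_namespace_variants_alt (full_name : String) : List String :=
  let components := (PySem.Str.split? full_name ".").getD []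
  let current := PySem.List.pyGetD components (-1) ""
  ((PySem.List.slice components none (some (-1))).reverse.foldl
    (fun (st : String × List String) comp =>
      let cur := comp ++ "." ++ st.1
      (cur, st.2 ++ [cur]))
    (current, [current])).2

-- ===== PRECONDITION & SPEC =====
def Spec_generate_namespace_variants (full_name : String) (out : List String) : Prop := out = generate_namespace_variants_alt full_name
instance (full_name : String) (out : List String) : Decidable (Spec_generate_namespace_variants full_name out) := by unfold Spec_generate_namespace_variants; infer_instance

-- ===== CLAIM (what is proved, stated in full; the proofs are below) =====
def Claim_equal_generate_namespace_variants : Prop := ∀ (full_name : String), Dom_generate_namespace_variants full_name → Spec_generate_namespace_variants full_name (generate_namespace_variants full_name)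

-- ===== LEMMAS AND PROOFS =====

/-- The common value of both programs, as a structural recursion on the component list. -/
def pvSpecV : List String → List String
  | [] => [""]
  | [x] => [x]
  | c :: d :: rest => pvSpecV (d :: rest) ++ [PySem.Str.join "." (c :: d :: rest)]

theorem pv_join_cons (c d : String) (rest : List String) :
    c ++ "." ++ PySem.Str.join "." (d :: rest) = PySem.Str.join "." (c :: d :: rest) := by
  rw [← String.toList_inj]
  simp [String.toList_append, PySem.Str.toList_join, PySem.Chars.join_cons_cons]

theorem pv_join_singleton (x : String) : PySem.Str.join "." [x] = x := by
  rw [← String.toList_inj]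
  simp [PySem.Str.toList_join, PySem.Chars.join_singleton]

/-- B's loop invariant: the fold returns the full join and the whole variant list. -/
theorem pv_B_fold (cs : List String) (h : cs ≠ []) :
    cs.dropLast.reverse.foldl
      (fun (st : String × List String) comp =>
        (comp ++ "." ++ st.1, st.2 ++ [comp ++ "." ++ st.1]))
      (cs.getLast h, [cs.getLast h])
    = (PySem.Str.join "." cs, pvSpecV cs) := by
  induction cs with
  | nil => exact absurd rfl h
  | cons c rest ih =>
    cases rest with
    | nil => simp [pvSpecV, pv_join_singleton]
    | cons d rest' =>
      have hr : d :: rest' ≠ [] := by simp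
      have : (c :: d :: rest').dropLast.reverse
           = ((d :: rest').dropLast.reverse) ++ [c] := by
        simp [List.dropLast_cons_of_ne_nil hr]
      rw [this, List.foldl_append, List.getLast_cons hr, ih hr]
      simp [pvSpecV, pv_join_cons]

/-- A's variant list, re-indexed onto `List.range`, equals the structural spec. -/
theorem pv_A_range (cs : List String) (h : cs ≠ []) :
    cs.getLast h ::
      ((List.range (cs.length - 1)).map
        (fun k => PySem.Str.join "." (cs.drop (cs.length - 2 - k))))
    = pvSpecV cs := by
  induction cs with
  | nil => exact absurd rfl h
  | cons c rest ih =>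
    cases rest with
    | nil => simp [pvSpecV]
    | cons d rest' =>
      have hr : d :: rest' ≠ [] := by simp
      have hlen : (c :: d :: rest').length - 1 = rest'.length + 1 := by simp
      rw [hlen, List.range_succ, List.map_append, List.getLast_cons hr]
      have hmap : (List.range rest'.length).map
            (fun k => PySem.Str.join "." ((c :: d :: rest').drop ((c :: d :: rest').length - 2 - k)))
          = (List.range ((d :: rest').length - 1)).map
            (fun k => PySem.Str.join "." ((d :: rest').drop ((d :: rest').length - 2 - k))) := by
        have hl : rest'.length = (d :: rest').length - 1 := by simp
        rw [← hl]
        apply List.map_congr_left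
        intro k hk
        rw [List.mem_range] at hk
        have h1 : (c :: d :: rest').length - 2 - k = (rest'.length - k - 1) + 1 := by
          simp only [List.length_cons]; omega
        have h2 : (d :: rest').length - 2 - k = rest'.length - k - 1 := by
          simp only [List.length_cons]; omega
        rw [h1, h2, List.drop_succ_cons]
      have hlast : PySem.Str.join "."
            ((c :: d :: rest').drop ((c :: d :: rest').length - 2 - rest'.length))
          = PySem.Str.join "." (c :: d :: rest') := by
        have : (c :: d :: rest').length - 2 - rest'.length = 0 := by
          simp only [List.length_cons]; omega
        rw [this, List.drop_zero]
      rw [hmap]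
      simp only [List.map_cons, List.map_nil]
      rw [hlast, ← List.cons_append, ih hr]
      simp [pvSpecV]

/-- The pyRange countdown in A is the `List.range` re-indexing of `pv_A_range`. -/
theorem pv_A_pyRange (cs : List String) (h : cs ≠ []) :
    (PySem.List.pyRange ((cs.length : Int) - 2) (-1) (-1)).map
      (fun i => PySem.Str.join "." (PySem.List.slice cs (some i) none))
    = (List.range (cs.length - 1)).map
      (fun k => PySem.Str.join "." (cs.drop (cs.length - 2 - k))) := by
  have hn : 1 ≤ cs.length := List.length_pos_of_ne_nil h
  rw [PySem.List.pyRange_neg_one, List.map_map]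
  have hcnt : ((cs.length : Int) - 2 - (-1)).toNat = cs.length - 1 := by omega
  rw [hcnt]
  apply List.map_congr_left
  intro k hk
  rw [List.mem_range] at hk
  simp only [Function.comp]
  have h2 : 2 ≤ cs.length := by omega
  have hnn : (0 : Int) ≤ (cs.length : Int) - 2 - (k : Int) := by omega
  rw [PySem.List.slice_from cs hnn]
  have ht : ((cs.length : Int) - 2 - (k : Int)).toNat = cs.length - 2 - k := by omega
  rw [ht]

theorem pv_main (cs : List String) :
    (PySem.List.pyRange ((cs.length : Int) - 2) (-1) (-1)).foldl
      (fun acc i => acc ++ [PySem.Str.join "." (PySem.List.slice cs (some i) none)])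
      [PySem.List.pyGetD cs (-1) ""]
    = ((PySem.List.slice cs none (some (-1))).reverse.foldl
        (fun (st : String × List String) comp =>
          (comp ++ "." ++ st.1, st.2 ++ [comp ++ "." ++ st.1]))
        (PySem.List.pyGetD cs (-1) "", [PySem.List.pyGetD cs (-1) ""])).2 := by
  rcases eq_or_ne cs [] with rfl | h
  · decide
  · rw [PySem.List.slice_to_neg_one, PySem.List.pyGetD_neg_one cs "" h,
        PySem.List.foldl_append_singleton_eq_map, pv_B_fold cs h, pv_A_pyRange cs h]
    exact pv_A_range cs h

-- ===== VERDICT (by name: the statement is the Claim_ definition above) =====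
theorem generate_namespace_variants_spec : Claim_equal_generate_namespace_variants := by
  intro full_name _
  unfold Spec_generate_namespace_variants generate_namespace_variants generate_namespace_variants_alt
  exact pv_main _
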